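-- pv_equiv track=rewrite | github.com/dnjswoc/algorithm-problem | SWEA/adv_1w/day4/4873_remake/4873_remake.py | remove_repeat_ch
-- ===== SOURCE A (Python) =====
-- def remove_repeat_ch(password):
--     score = 0
--     stack = []
--     cnt = 1
--     for ch in password:
--         if not stack or stack[-1][0] != ch:
--             cnt = 1
--             stack.append([ch, cnt])
--         else:
--             stack[-1][1] += cnt
--
--     # [['X', 1], ['A', 2], ['Y', 1], ['B', 3], ['C', 1], ['D', 2], ['C', 1], ['Z', 1], ['D', 1]]
--
--     word = ''
--     for li in stack:
--         if li[-1] >= 2: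
--             score += li[-1]
--         else:
--             word += li[0]
--
--     return score, word  # (7, 'XYCCZD')
-- ===== SOURCE B (Python) =====
-- def remove_repeat_ch(password):
--     score = 0
--     word = ''
--     prev = None
--     count = 0
--     for ch in password:
--         if prev == ch:
--             count += 1
--         else:
--             if count >= 2:
--                 score += count
--             elif count == 1:
--                 word += prev
--             prev = ch
--             count = 1
--     if count >= 2:
--         score += count
--     elif count == 1:
--         word += prev
--     return score, word
-- ===== Notes on version B (the rewrite author's own statement) =====
-- stated objective: simpler
-- what changed: Fuses A's two passes (build a run-length stack list, then score it) into one pass that tracks only the current run char and count and flushes each completed run directly into score/word, so no intermediate stack is built.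
import Mathlib
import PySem

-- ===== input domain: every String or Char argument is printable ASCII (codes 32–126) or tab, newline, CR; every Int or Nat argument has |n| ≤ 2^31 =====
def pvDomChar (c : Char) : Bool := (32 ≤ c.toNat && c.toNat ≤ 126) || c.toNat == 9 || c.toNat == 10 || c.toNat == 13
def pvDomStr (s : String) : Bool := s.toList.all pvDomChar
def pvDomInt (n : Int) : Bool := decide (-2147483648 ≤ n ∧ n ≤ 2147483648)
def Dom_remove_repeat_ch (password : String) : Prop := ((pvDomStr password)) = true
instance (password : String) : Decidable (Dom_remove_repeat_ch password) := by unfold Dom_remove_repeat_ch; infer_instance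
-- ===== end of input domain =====

-- B fuses A's two passes (build run-length stack, then score it) into one pass with a
-- pending (prev, count) run flushed into score/word; objective: simpler.


-- ===== PORT A =====
-- one step of A's stack-building loop: push [ch,1] on empty/different last, else bump last count
def pvBuild (st : List (Char × Int)) (ch : Char) : List (Char × Int) :=
  match st.getLast? with
  | none => st ++ [(ch, 1)]
  | some (c, n) => if c ≠ ch then st ++ [(ch, 1)] else st.dropLast ++ [(c, n + 1)]

-- one step of A's scoring loop over the stack
def pvScore (acc : Int × String) (li : Char × Int) : Int × String :=
  if li.2 ≥ 2 then (acc.1 + li.2, acc.2) else (acc.1, acc.2 ++ li.1.toString)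

def remove_repeat_ch (password : String) : Int × String :=
  let stack := password.toList.foldl pvBuild []
  stack.foldl pvScore (0, "")

-- ===== PORT B =====
-- B's single loop: state (score, word, prev, count); flush the pending run when the char changes
def pvGo (score : Int) (word : String) (prev : Option Char) (count : Int) :
    List Char → Int × String
  | [] =>
      if count ≥ 2 then (score + count, word)
      else if count = 1 then
        (score, word ++ (match prev with | some c => c.toString | none => ""))
      else (score, word)
  | ch :: rest =>
      if prev = some ch then pvGo score word prev (count + 1) rest
      else
        if count ≥ 2 then pvGo (score + count) word (some ch) 1 rest
        else if count = 1 then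
          pvGo score (word ++ (match prev with | some c => c.toString | none => "")) (some ch) 1 rest
        else pvGo score word (some ch) 1 rest

def remove_repeat_ch_alt (password : String) : Int × String :=
  pvGo 0 "" none 0 password.toList

-- ===== PRECONDITION & SPEC =====
def Spec_remove_repeat_ch (password : String) (out : Int × String) : Prop := out = remove_repeat_ch_alt password
instance (password : String) (out : Int × String) : Decidable (Spec_remove_repeat_ch password out) := by unfold Spec_remove_repeat_ch; infer_instance

-- ===== CLAIM (what is proved, stated in full; the proofs are below) =====
def Claim_equal_remove_repeat_ch : Prop := ∀ (password : String), Dom_remove_repeat_ch password → Spec_remove_repeat_ch password (remove_repeat_ch password)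

-- ===== LEMMAS AND PROOFS =====

lemma pvPushAppend (w y : String) (c : Char) : w.push c ++ y = w ++ (String.singleton c ++ y) := by
  rw [← String.append_assoc, String.append_singleton]

lemma pvAppendEmptyPush (w : String) (c : Char) : w ++ "".push c = w.push c := by cases w; rfl

-- scoring as a monoid value of a stack
def scoreOf (l : List (Char × Int)) : Int × String := l.foldl pvScore (0, "")

lemma pvScore_shift (s : Int) (w : String) (li : Char × Int) :
    pvScore (s, w) li = ((s + (pvScore (0, "") li).1, w ++ (pvScore (0, "") li).2)) := by
  unfold pvScore
  split_ifs <;> simp [pvAppendEmptyPush]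

lemma foldl_pvScore_shift (l : List (Char × Int)) (s : Int) (w : String) :
    l.foldl pvScore (s, w) = (s + (scoreOf l).1, w ++ (scoreOf l).2) := by
  induction l generalizing s w with
  | nil => simp [scoreOf]
  | cons li t ih =>
      simp only [scoreOf, List.foldl_cons]
      rw [ih, pvScore_shift, ih ((pvScore (0, "") li).1) ((pvScore (0, "") li).2)]
      simp [String.append_assoc, add_assoc]

lemma scoreOf_append (l₁ l₂ : List (Char × Int)) :
    scoreOf (l₁ ++ l₂) = ((scoreOf l₁).1 + (scoreOf l₂).1, (scoreOf l₁).2 ++ (scoreOf l₂).2) := by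
  unfold scoreOf
  rw [List.foldl_append, foldl_pvScore_shift]
  rfl

-- pvBuild only looks at the last element, so a fixed nonempty tail absorbs one step
lemma pvBuild_append (st t : List (Char × Int)) (ht : t ≠ []) (ch : Char) :
    pvBuild (st ++ t) ch = st ++ pvBuild t ch := by
  unfold pvBuild
  rw [List.getLast?_append_of_ne_nil _ ht]
  cases h : t.getLast? with
  | none => simp [List.getLast?_eq_none_iff] at h; exact absurd h ht
  | some p =>
      cases p with
      | mk c n =>
          dsimp only
          split_ifs with hc
          · simp
          · rw [List.dropLast_append_of_ne_nil ht]
            simp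

lemma pvBuild_ne_nil (t : List (Char × Int)) (ch : Char) : pvBuild t ch ≠ [] := by
  unfold pvBuild
  cases h : t.getLast? with
  | none => simp
  | some p => cases p with
      | mk c n => dsimp only; split_ifs <;> simp

-- a fixed nonempty prefix of the stack is never touched again by A's building loop
lemma foldl_pvBuild_append (l : List Char) (st t : List (Char × Int)) (ht : t ≠ []) :
    l.foldl pvBuild (st ++ t) = st ++ l.foldl pvBuild t := by
  induction l generalizing t with
  | nil => rfl
  | cons ch rest ih =>
      simp only [List.foldl_cons]
      rw [pvBuild_append st t ht ch, ih _ (pvBuild_ne_nil t ch)]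

-- the main invariant: B's loop on a pending run (c, n) equals the flushed score of A's stack grown from [(c, n)]
lemma pvGo_main (l : List Char) (c : Char) (n : Int) (hn : 1 ≤ n) (s : Int) (w : String) :
    pvGo s w (some c) n l =
      (s + (scoreOf (l.foldl pvBuild [(c, n)])).1, w ++ (scoreOf (l.foldl pvBuild [(c, n)])).2) := by
  induction l generalizing c n s w with
  | nil =>
      unfold pvGo
      simp only [List.foldl_nil]
      by_cases h2 : n ≥ 2
      · simp [h2, scoreOf, pvScore]
      · have h1 : n = 1 := by omega
        subst h1
        rw [if_neg h2, if_pos rfl]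
        have hs : scoreOf [(c, 1)] = (0, c.toString) := rfl
        rw [hs]
        simp
  | cons ch rest ih =>
      unfold pvGo
      by_cases heq : (some c : Option Char) = some ch
      · have hc : c = ch := by simpa using heq
        subst hc
        rw [if_pos rfl]
        simp only [List.foldl_cons]
        have hb : pvBuild [(c, n)] c = [(c, n + 1)] := by
          unfold pvBuild; simp
        rw [hb]
        exact ih c (n + 1) (by omega) s w
      · have hc : c ≠ ch := fun h => heq (by rw [h])
        rw [if_neg heq]
        simp only [List.foldl_cons]
        have hb : pvBuild [(c, n)] ch = [(c, n)] ++ [(ch, 1)] := by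
          unfold pvBuild; simp [hc]
        rw [hb, foldl_pvBuild_append rest [(c, n)] [(ch, 1)] (by simp),
            scoreOf_append]
        by_cases h2 : n ≥ 2
        · simp only [h2, if_true]
          rw [ih ch 1 (by omega)]
          have hs : scoreOf [(c, n)] = (n, "") := by simp [scoreOf, pvScore, h2]
          simp [hs, add_assoc]
        · have h1 : n = 1 := by omega
          subst h1
          rw [if_neg h2, if_pos rfl]
          have hs : scoreOf [(c, 1)] = (0, c.toString) := rfl
          rw [ih ch 1 (by omega), hs]
          simp
          exact pvPushAppend w _ c

-- ===== VERDICT (by name: the statement is the Claim_ definition above) =====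
theorem remove_repeat_ch_spec : Claim_equal_remove_repeat_ch := by
  intro password _
  unfold Spec_remove_repeat_ch remove_repeat_ch remove_repeat_ch_alt
  cases h : password.toList with
  | nil => rfl
  | cons ch rest =>
      simp only [List.foldl_cons]
      have hb : pvBuild [] ch = [(ch, 1)] := by unfold pvBuild; rfl
      rw [hb]
      have hg : pvGo 0 "" none 0 (ch :: rest) = pvGo 0 "" (some ch) 1 rest := by
        rw [pvGo, if_neg (by simp)]
        norm_num
      rw [hg, pvGo_main rest ch 1 (by omega) 0 ""]
      simp [scoreOf]
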